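-- pv_equiv track=rewrite | github.com/cdr135/google-foobar | python/prepare-the-bunnies-escape.py | solution
-- ===== SOURCE A (Python) =====
-- from collections import deque
--
-- def solution(map):
--     w = len(map)
--     h = len(map[0])
--     sdist = [[0 for c in r] for r in map]
--     fdist = [[0 for c in r] for r in map]
--     def fill(arr, x,y):
--         q = deque([(1,x,y)])
--         while q:
--             d,i,j = q.pop()
--             if 0<=i<w and 0<=j<h and arr[i][j]==0:
--                 arr[i][j]=d
--                 d+=1
--                 if map[i][j]==0:
--                     q.extendleft(((d,i-1,j),(d,i+1,j),
--                                   (d,i,j-1),(d,i,j+1)))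
--     fill(sdist, 0, 0)
--     fill(fdist,w-1,h-1)
--     return min(sdist[i][j]+fdist[i][j] for i in range(w) for j in range(h)
--                if sdist[i][j] and fdist[i][j])-1
-- ===== SOURCE B (Python) =====
-- def _relax(map, arr, w, h, i, j):
--     # one Jacobi relaxation of cell (i, j): keep a set distance, else 1 + min
--     # over already-distanced open in-bounds neighbours.
--     if arr[i][j] != 0:
--         return arr[i][j]
--     vals = [arr[a][b]
--             for (a, b) in ((i - 1, j), (i + 1, j), (i, j - 1), (i, j + 1))
--             if 0 <= a < w and 0 <= b < h and map[a][b] == 0 and arr[a][b] > 0]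
--     if vals:
--         return min(vals) + 1
--     return 0
--
--
-- def _dists(map, w, h, si, sj):
--     # distance grid from (si, sj) by whole-grid relaxation sweeps (no queue):
--     # sweep until a fixed point; each changing sweep marks a new cell, so
--     # w*h sweeps always suffice.
--     arr = [[1 if (i == si and j == sj) else 0 for j in range(h)]
--            for i in range(w)]
--     for _ in range(w * h):
--         new = [[_relax(map, arr, w, h, i, j) for j in range(h)]
--                for i in range(w)]
--         if new == arr:
--             break
--         arr = new
--     return arr
--
--
-- def solution(map):
--     w = len(map)
--     h = len(map[0])
--     s = _dists(map, w, h, 0, 0)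
--     f = _dists(map, w, h, w - 1, h - 1)
--     return min(s[i][j] + f[i][j] for i in range(w) for j in range(h)
--                if s[i][j] and f[i][j]) - 1
-- ===== Notes on version B (the rewrite author's own statement) =====
-- stated objective: alternative
-- what changed: Replaces the two deque-based BFS flood fills over mutable grids with queue-free whole-grid Jacobi relaxation sweeps (each cell takes 1 + min of its distanced open neighbours) iterated to a fixed point, keeping the same candidate-cell min scan.
import Mathlib
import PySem

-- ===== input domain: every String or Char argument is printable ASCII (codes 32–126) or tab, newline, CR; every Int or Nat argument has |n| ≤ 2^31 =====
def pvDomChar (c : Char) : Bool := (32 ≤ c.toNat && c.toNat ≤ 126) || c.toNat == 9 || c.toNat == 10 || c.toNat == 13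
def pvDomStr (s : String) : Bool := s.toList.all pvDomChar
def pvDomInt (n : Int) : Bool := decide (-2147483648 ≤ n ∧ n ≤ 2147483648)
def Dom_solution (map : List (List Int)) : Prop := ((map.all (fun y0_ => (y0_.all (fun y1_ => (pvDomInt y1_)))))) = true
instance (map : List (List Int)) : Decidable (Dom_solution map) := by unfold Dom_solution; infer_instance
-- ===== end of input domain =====

-- B replaces A's two deque-based BFS flood fills with queue-free whole-grid
-- relaxation sweeps iterated to a fixed point (alternative algorithm, same results).

-- ===== shared small helpers (both Pythons contain these same expressions) =====

-- map[i][j] / arr[i][j]; the default is only reachable outside the guards /outside Pre_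
def cellA (m : List (List Int)) (i j : Int) : Int :=
  ((PySem.List.pyGet? ((PySem.List.pyGet? m i).getD []) j)).getD 1

def getCell (arr : List (List Int)) (i j : Int) : Int :=
  ((PySem.List.pyGet? ((PySem.List.pyGet? arr i).getD []) j)).getD 0

-- an abbrev, so Decidable instances for the guards below are found by unfolding
abbrev inb (w h i j : Int) : Prop := 0 ≤ i ∧ i < w ∧ 0 ≤ j ∧ j < h

def nbrs (i j : Int) : List (Int × Int) := [(i-1,j),(i+1,j),(i,j-1),(i,j+1)]

-- shared final line of both Pythons:
-- min(s[i][j]+f[i][j] for i in range(w) for j in range(h) if s[i][j] and f[i][j]) - 1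
-- (the .getD 1 default is Python's ValueError on an empty generator, outside Pre_)
def scanMin (s f : List (List Int)) (w h : Int) : Int :=
  let cands := (List.range w.toNat).flatMap (fun (i : ℕ) =>
    (List.range h.toNat).filterMap (fun (j : ℕ) =>
      if getCell s (i : Int) (j : Int) ≠ 0 ∧ getCell f (i : Int) (j : Int) ≠ 0
      then some (getCell s (i : Int) (j : Int) + getCell f (i : Int) (j : Int)) else none))
  (PySem.List.min? cands (fun v => v)).getD 1 - 1

-- ===== PORT A =====

-- arr[i][j] = v (guarded by 0<=i<w, 0<=j<h in A, so .toNat is exact there)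
def setCell (arr : List (List Int)) (i j : Int) (v : Int) : List (List Int) :=
  arr.set i.toNat (((PySem.List.pyGet? arr i).getD []).set j.toNat v)

-- the `while q` loop of A's fill; the deque (pop right / extendleft) is a FIFO
-- queue, kept here as a list popped at the head with arrivals appended at the end
-- in Python's push order.  Fuel: each pop consumes one queue entry and entries
-- total at most 1 + 4*(number of cells), so the fuel below is never exhausted.
def fillLoopA (m : List (List Int)) (w h : Int) :
    ℕ → List (Int × Int × Int) → List (List Int) → List (List Int)
  | 0, _, arr => arr
  | _ + 1, [], arr => arr
  | fuel + 1, (d, i, j) :: q, arr =>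
    if inb w h i j ∧ getCell arr i j = 0 then
      let arr' := setCell arr i j d
      if cellA m i j = 0 then
        fillLoopA m w h fuel (q ++ [(d+1, i-1, j), (d+1, i+1, j), (d+1, i, j-1), (d+1, i, j+1)]) arr'
      else fillLoopA m w h fuel q arr'
    else fillLoopA m w h fuel q arr

def fillA (m : List (List Int)) (w h x y : Int) : List (List Int) :=
  fillLoopA m w h (1 + 4 * (m.map List.length).sum) [(1, x, y)]
    (m.map (fun r => r.map (fun _ => 0)))

def solution (map : List (List Int)) : Int :=
  let w : Int := map.length
  let h : Int := ((PySem.List.pyGet? map 0).getD []).length  -- len(map[0]); IndexError on [] is outside Pre_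
  let sdist := fillA map w h 0 0
  let fdist := fillA map w h (w-1) (h-1)
  scanMin sdist fdist w h

-- ===== PORT B =====

-- _relax of Source B
def relaxB (m arr : List (List Int)) (w h i j : Int) : Int :=
  if getCell arr i j ≠ 0 then getCell arr i j
  else
    let vals := ((nbrs i j).filter (fun p =>
        decide (inb w h p.1 p.2) && (cellA m p.1 p.2 == 0) && decide (0 < getCell arr p.1 p.2))).map
      (fun p => getCell arr p.1 p.2)
    match PySem.List.min? vals (fun v => v) with
    | some v => v + 1
    | none => 0

def initB (w h si sj : Int) : List (List Int) :=
  (List.range w.toNat).map (fun (i : ℕ) =>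
    (List.range h.toNat).map (fun (j : ℕ) => if (i : Int) = si ∧ (j : Int) = sj then 1 else 0))

def stepB (m arr : List (List Int)) (w h : Int) : List (List Int) :=
  (List.range w.toNat).map (fun (i : ℕ) =>
    (List.range h.toNat).map (fun (j : ℕ) => relaxB m arr w h (i : Int) (j : Int)))

-- the `for _ in range(w*h): ... if new == arr: break` sweep loop of _dists
def loopB (m : List (List Int)) (w h : Int) : ℕ → List (List Int) → List (List Int)
  | 0, arr => arr
  | k + 1, arr =>
    let new := stepB m arr w h
    if new = arr then arr else loopB m w h k new

def distsB (m : List (List Int)) (w h si sj : Int) : List (List Int) :=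
  loopB m w h (w.toNat * h.toNat) (initB w h si sj)

def solution_alt (map : List (List Int)) : Int :=
  let w : Int := map.length
  let h : Int := ((PySem.List.pyGet? map 0).getD []).length
  let s := distsB map w h 0 0
  let f := distsB map w h (w-1) (h-1)
  scanMin s f w h

-- ===== PRECONDITION & SPEC =====

-- Reachability of the exit from (0,0) crossing at most one non-open cell, as a
-- condition on the input: the reflexive-transitive closure of single steps over
-- states (cell, wall-already-crossed), computed as a bounded fixpoint.  This is
-- not either port's algorithm (neither port explores (cell, crossed) states).
def escSucc (m : List (List Int)) (w h : Int) (st : (Int × Int) × Bool) :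
    List ((Int × Int) × Bool) :=
  ((nbrs st.1.1 st.1.2).filter (fun p =>
      decide (inb w h p.1 p.2) && !(st.2 && !(cellA m p.1 p.2 == 0)))).map
    (fun p => (p, st.2 || !(cellA m p.1 p.2 == 0)))

def escIter (m : List (List Int)) (w h : Int) :
    ℕ → List ((Int × Int) × Bool) → List ((Int × Int) × Bool)
  | 0, s => s
  | k + 1, s =>
    escIter m w h k ((s.flatMap (escSucc m w h)).foldl
      (fun acc x => if x ∈ acc then acc else acc ++ [x]) s)

def canEscape (map : List (List Int)) : Bool :=
  let w : Int := map.length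
  let h : Int := ((PySem.List.pyGet? map 0).getD []).length
  if w ≤ 0 ∨ h ≤ 0 then false
  else (escIter map w h (2 * w.toNat * h.toNat + 1)
          [((0, 0), !(cellA map 0 0 == 0))]).any (fun st => st.1 = (w - 1, h - 1))

-- Pre_ excludes exactly the inputs where A raises: the empty map and a first row
-- of length 0 (IndexError / empty min), a row shorter than len(map[0]) (IndexError
-- in the final scan), and maps where the exit is not reachable from (0,0) with at
-- most one wall removed (ValueError from min over an empty generator).
def Pre_solution (map : List (List Int)) : Prop :=
  map ≠ [] ∧ 0 < ((PySem.List.pyGet? map 0).getD []).length ∧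
  (∀ r ∈ map, ((PySem.List.pyGet? map 0).getD []).length ≤ r.length) ∧
  canEscape map = true

instance (map : List (List Int)) : Decidable (Pre_solution map) := by
  unfold Pre_solution; infer_instance

def pvWitness_solution : List (List Int) := ([[0]])

def Spec_solution (map : List (List Int)) (out : Int) : Prop := out = solution_alt map
instance (map : List (List Int)) (out : Int) : Decidable (Spec_solution map out) := by
  unfold Spec_solution; infer_instance

-- ===== CLAIM (what is proved, stated in full; the proofs are below) =====
def Claim_equal_solution : Prop :=
  ∀ (map : List (List Int)), Dom_solution map → Pre_solution map → Spec_solution map (solution map)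

-- ===== LEMMAS AND PROOFS =====

-- the common mathematical description of both fills: `specLvl k i j` says that the
-- flood fill started at (si,sj) has reached cell (i,j) within k expansion rounds
def specLvl (m : List (List Int)) (w h si sj : Int) : ℕ → Int → Int → Bool
  | 0 => fun i j => decide (inb w h i j) && decide (i = si) && decide (j = sj)
  | k + 1 => fun i j =>
    specLvl m w h si sj k i j ||
      (decide (inb w h i j) &&
        (nbrs i j).any (fun p => specLvl m w h si sj k p.1 p.2 && (cellA m p.1 p.2 == 0)))

def reachS (m : List (List Int)) (w h si sj i j : Int) : Prop :=
  ∃ k, specLvl m w h si sj k i j = true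

-- the value both fills store in cell (i,j): 1 + (first round reaching it), 0 if never
noncomputable def DV (m : List (List Int)) (w h si sj i j : Int) : Int :=
  @dite Int (reachS m w h si sj i j) (Classical.dec _)
    (fun hr => ((Nat.find hr : ℕ) : Int) + 1) (fun _ => 0)

theorem specLvl_succ (m : List (List Int)) (w h si sj : Int) (k : ℕ) (i j : Int) :
    specLvl m w h si sj (k+1) i j =
      (specLvl m w h si sj k i j ||
        (decide (inb w h i j) &&
          (nbrs i j).any (fun p => specLvl m w h si sj k p.1 p.2 && (cellA m p.1 p.2 == 0)))) := rfl

theorem specLvl_zero_iff (m : List (List Int)) (w h si sj : Int) (i j : Int) :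
    specLvl m w h si sj 0 i j = true ↔ inb w h i j ∧ i = si ∧ j = sj := by
  show (decide (inb w h i j) && decide (i = si) && decide (j = sj)) = true ↔ _
  simp [and_assoc]

theorem specLvl_succ_iff (m : List (List Int)) (w h si sj : Int) (k : ℕ) (i j : Int) :
    specLvl m w h si sj (k+1) i j = true ↔
      (specLvl m w h si sj k i j = true ∨
        (inb w h i j ∧ ∃ p ∈ nbrs i j, specLvl m w h si sj k p.1 p.2 = true ∧ cellA m p.1 p.2 = 0)) := by
  rw [specLvl_succ]
  simp [List.any_eq_true]

theorem specLvl_mono (m : List (List Int)) (w h si sj : Int) {k l : ℕ} (hkl : k ≤ l)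
    {i j : Int} (hk : specLvl m w h si sj k i j = true) :
    specLvl m w h si sj l i j = true := by
  induction l with
  | zero =>
    have : k = 0 := by omega
    exact this ▸ hk
  | succ l ih =>
    rcases Nat.lt_or_ge k (l+1) with hl | hl
    · exact (specLvl_succ_iff m w h si sj l i j).2 (Or.inl (ih (by omega)))
    · have : k = l + 1 := by omega
      exact this ▸ hk

theorem specLvl_inb (m : List (List Int)) (w h si sj : Int) {k : ℕ} {i j : Int}
    (hk : specLvl m w h si sj k i j = true) : inb w h i j := by
  cases k with
  | zero => exact ((specLvl_zero_iff m w h si sj i j).1 hk).1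
  | succ k =>
    rcases (specLvl_succ_iff m w h si sj k i j).1 hk with hh | hh
    · exact specLvl_inb m w h si sj hh
    · exact hh.1

theorem mem_nbrs_comm {a b i j : Int} (hp : (a, b) ∈ nbrs i j) : (i, j) ∈ nbrs a b := by
  simp only [nbrs, List.mem_cons, List.not_mem_nil, or_false, Prod.ext_iff] at hp ⊢
  omega

theorem specLvl_adj (m : List (List Int)) (w h si sj : Int) {k : ℕ} {a b i j : Int}
    (hk : specLvl m w h si sj k a b = true) (hopen : cellA m a b = 0)
    (hin : inb w h i j) (hnb : (a, b) ∈ nbrs i j) :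
    specLvl m w h si sj (k+1) i j = true :=
  (specLvl_succ_iff m w h si sj k i j).2 (Or.inr ⟨hin, ⟨(a,b), hnb, hk, hopen⟩⟩)

-- DV facts
theorem DV_of_reach (m : List (List Int)) (w h si sj i j : Int)
    (hr : reachS m w h si sj i j) :
    DV m w h si sj i j = ((Nat.find hr : ℕ) : Int) + 1 := by
  unfold DV
  rw [dif_pos hr]

theorem DV_of_not_reach (m : List (List Int)) (w h si sj i j : Int)
    (hr : ¬ reachS m w h si sj i j) : DV m w h si sj i j = 0 := by
  unfold DV
  rw [dif_neg hr]

theorem DV_eq_iff (m : List (List Int)) (w h si sj i j : Int) (d : ℕ) :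
    (specLvl m w h si sj d i j = true ∧ ∀ k, specLvl m w h si sj k i j = true → d ≤ k) →
    DV m w h si sj i j = (d : Int) + 1 := by
  rintro ⟨hd, hmin⟩
  have hr : reachS m w h si sj i j := ⟨d, hd⟩
  rw [DV_of_reach m w h si sj i j hr]
  have h1 : Nat.find hr ≤ d := Nat.find_min' hr hd
  have h2 : d ≤ Nat.find hr :=
    hmin _ (Nat.find_spec hr)
  have : Nat.find hr = d := le_antisymm h1 h2
  rw [this]

theorem DV_find_spec (m : List (List Int)) (w h si sj i j : Int)
    (hr : reachS m w h si sj i j) :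
    specLvl m w h si sj (Nat.find hr) i j = true :=
  Nat.find_spec hr

theorem DV_nonneg (m : List (List Int)) (w h si sj i j : Int) : 0 ≤ DV m w h si sj i j := by
  unfold DV
  split
  · positivity
  · simp

theorem DV_ne_zero_iff (m : List (List Int)) (w h si sj i j : Int) :
    DV m w h si sj i j ≠ 0 ↔ reachS m w h si sj i j := by
  unfold DV
  split
  · simp_all
    omega
  · simp_all

theorem DV_le (m : List (List Int)) (w h si sj i j : Int) {k : ℕ}
    (hk : specLvl m w h si sj k i j = true) : DV m w h si sj i j ≤ (k : Int) + 1 := by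
  have hr : reachS m w h si sj i j := ⟨k, hk⟩
  rw [DV_of_reach m w h si sj i j hr]
  have := Nat.find_min' hr hk
  omega

theorem specLvl_DV_le (m : List (List Int)) (w h si sj i j : Int) {k : ℕ}
    (hr : reachS m w h si sj i j)
    (hk : DV m w h si sj i j ≤ (k : Int) + 1) : specLvl m w h si sj k i j = true := by
  rw [DV_of_reach m w h si sj i j hr] at hk
  exact specLvl_mono m w h si sj (by omega) (DV_find_spec m w h si sj i j hr)


-- ===== cell access / update utilities =====

theorem getCell_nonneg_eq (arr : List (List Int)) (i j : Int) (hi : 0 ≤ i) (hj : 0 ≤ j) :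
    getCell arr i j = (arr.getD i.toNat []).getD j.toNat 0 := by
  unfold getCell
  rw [PySem.List.pyGet?_of_nonneg _ hi, PySem.List.pyGet?_of_nonneg _ hj]
  simp [List.getD_eq_getElem?_getD]

theorem setCell_eq (arr : List (List Int)) (i j : Int) (v : Int) (hi : 0 ≤ i) :
    setCell arr i j v = arr.set i.toNat ((arr.getD i.toNat []).set j.toNat v) := by
  unfold setCell
  rw [PySem.List.pyGet?_of_nonneg _ hi, List.getD_eq_getElem?_getD]

theorem map_length_setCell (arr : List (List Int)) (i j v : Int) (hi : 0 ≤ i)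
    (hlt : i.toNat < arr.length) :
    (setCell arr i j v).map List.length = arr.map List.length := by
  rw [setCell_eq arr i j v hi]
  rw [List.map_set]
  have hrow : arr.getD i.toNat [] = arr[i.toNat] := by
    rw [List.getD_eq_getElem?_getD, List.getElem?_eq_getElem hlt]; rfl
  rw [hrow, List.length_set]
  have hmm : i.toNat < (arr.map List.length).length := by simpa using hlt
  have : (arr.map List.length)[i.toNat]'hmm = arr[i.toNat].length :=
    List.getElem_map List.length
  rw [← this, List.set_getElem_self]

theorem getCell_setCell_self (arr : List (List Int)) (i j v : Int)
    (hi : 0 ≤ i) (hj : 0 ≤ j) (hiw : i.toNat < arr.length)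
    (hjh : j.toNat < (arr.getD i.toNat []).length) :
    getCell (setCell arr i j v) i j = v := by
  rw [getCell_nonneg_eq _ _ _ hi hj, setCell_eq arr i j v hi]
  simp only [List.getD_eq_getElem?_getD]
  rw [List.getElem?_set_self (by simpa using hiw)]
  simp only [Option.getD_some]
  rw [List.getElem?_set_self (by simpa [List.getD_eq_getElem?_getD] using hjh)]
  rfl

theorem getCell_setCell_ne (arr : List (List Int)) (i j v a b : Int)
    (hi : 0 ≤ i) (hj : 0 ≤ j) (ha : 0 ≤ a) (hb : 0 ≤ b)
    (hne : ¬ (a = i ∧ b = j)) :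
    getCell (setCell arr i j v) a b = getCell arr a b := by
  rw [getCell_nonneg_eq _ _ _ ha hb, getCell_nonneg_eq _ _ _ ha hb, setCell_eq arr i j v hi]
  simp only [List.getD_eq_getElem?_getD]
  by_cases hai : a = i
  · subst hai
    have hbj : b ≠ j := fun hh => hne ⟨rfl, hh⟩
    have hbj' : j.toNat ≠ b.toNat := by omega
    by_cases hlt : a.toNat < arr.length
    · rw [List.getElem?_set_self (by simpa using hlt)]
      have hrow : arr[a.toNat]? = some (arr[a.toNat]'hlt) := List.getElem?_eq_getElem hlt
      rw [hrow]
      simp only [Option.getD_some]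
      rw [List.getElem?_set_ne hbj']
    · rw [List.set_eq_of_length_le (by omega)]
  · have : i.toNat ≠ a.toNat := by omega
    rw [List.getElem?_set_ne this]

-- zero-cell counting, for the fuel budget of A's loop
def zeros (arr : List (List Int)) : ℕ :=
  (arr.map (fun r => r.countP (fun v => v == 0))).sum

theorem sum_set_nat (l : List ℕ) (n : ℕ) (x : ℕ) (hn : n < l.length) :
    (l.set n x).sum + l[n] = l.sum + x := by
  induction l generalizing n with
  | nil => simp at hn
  | cons a t ih =>
    cases n with
    | zero => simp [List.set]; omega
    | succ n =>
      simp only [List.set, List.sum_cons, List.getElem_cons_succ]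
      have := ih n (by simpa using hn)
      omega

theorem countP_set_row (r : List Int) (n : ℕ) (x : Int) (hn : n < r.length)
    (h0 : r[n] = 0) (hx : x ≠ 0) :
    (r.set n x).countP (fun v => v == 0) + 1 = r.countP (fun v => v == 0) := by
  induction r generalizing n with
  | nil => simp at hn
  | cons a t ih =>
    cases n with
    | zero =>
      have ha : a = 0 := by simpa using h0
      subst ha
      simp only [List.set, List.countP_cons]
      simp [hx]
    | succ n =>
      simp only [List.set, List.countP_cons]
      have := ih n (by simpa using hn) (by simpa using h0)
      split <;> omega

theorem zeros_setCell (arr : List (List Int)) (i j v : Int)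
    (hi : 0 ≤ i) (hj : 0 ≤ j) (hiw : i.toNat < arr.length)
    (hjh : j.toNat < (arr.getD i.toNat []).length)
    (h0 : getCell arr i j = 0) (hv : v ≠ 0) :
    zeros (setCell arr i j v) + 1 = zeros arr := by
  have hrow : arr.getD i.toNat [] = arr[i.toNat] := by
    rw [List.getD_eq_getElem?_getD, List.getElem?_eq_getElem hiw]; rfl
  rw [getCell_nonneg_eq _ _ _ hi hj, hrow] at h0
  rw [List.getD_eq_getElem?_getD, List.getElem?_eq_getElem (by rw [hrow] at hjh; exact hjh)] at h0
  simp only [Option.getD_some] at h0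
  unfold zeros
  rw [setCell_eq arr i j v hi, List.map_set]
  have hjh' : j.toNat < arr[i.toNat].length := by rw [hrow] at hjh; exact hjh
  have hsum := sum_set_nat (arr.map (fun r => r.countP (fun v => v == 0))) i.toNat
      (((arr.getD i.toNat []).set j.toNat v).countP (fun v => v == 0)) (by simpa using hiw)
  have hget : (arr.map (fun r => r.countP (fun v => v == 0)))[i.toNat]'(by simpa using hiw)
      = arr[i.toNat].countP (fun v => v == 0) := by simp
  rw [hget] at hsum
  have hcount := countP_set_row arr[i.toNat] j.toNat v hjh' h0 hv
  rw [hrow] at hsum ⊢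
  omega

-- ===== invariant of A's BFS loop =====
-- the queue is c ++ b: c holds the entries of the current level d0, b the entries
-- of level d0+1 generated so far; arr holds final values (= DV) for marked cells
structure InvA (m : List (List Int)) (w h si sj : Int) (d0 : ℕ)
    (c b : List (Int × Int × Int)) (arr : List (List Int)) : Prop where
  hw : (m.length : Int) = w
  hrows : ∀ r ∈ m, h ≤ (r.length : Int)
  hshape : arr.map List.length = m.map List.length
  hd0 : 1 ≤ d0
  hc : ∀ e ∈ c, e.1 = (d0 : Int)
  hb : ∀ e ∈ b, e.1 = (d0 : Int) + 1
  i1 : ∀ i j : Int, inb w h i j → getCell arr i j ≠ 0 → getCell arr i j = DV m w h si sj i j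
  i2c : ∀ e ∈ c, inb w h e.2.1 e.2.2 → specLvl m w h si sj (d0 - 1) e.2.1 e.2.2 = true
  i2b : ∀ e ∈ b, inb w h e.2.1 e.2.2 → specLvl m w h si sj d0 e.2.1 e.2.2 = true
  i3 : ∀ (k : ℕ) (i j : Int), inb w h i j → specLvl m w h si sj k i j = true → k + 2 ≤ d0 →
      getCell arr i j ≠ 0
  i4a : ∀ i j : Int, inb w h i j → specLvl m w h si sj (d0 - 1) i j = true →
      getCell arr i j = 0 → ((d0 : Int), i, j) ∈ c
  i4b : ∀ i j : Int, inb w h i j → specLvl m w h si sj d0 i j = true →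
      specLvl m w h si sj (d0 - 1) i j = false → getCell arr i j = 0 →
      (((d0 : Int) + 1, i, j) ∈ b ∨
        ∃ p ∈ nbrs i j, inb w h p.1 p.2 ∧ cellA m p.1 p.2 = 0 ∧
          specLvl m w h si sj (d0 - 1) p.1 p.2 = true ∧ getCell arr p.1 p.2 = 0)
  i5 : ∀ i j : Int, inb w h i j → getCell arr i j ≠ 0 → cellA m i j = 0 →
      ∀ p ∈ nbrs i j, inb w h p.1 p.2 →
        getCell arr p.1 p.2 ≠ 0 ∨ ∃ d : Int, (d, p.1, p.2) ∈ c ++ b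
  i6 : ∀ i j : Int, inb w h i j → getCell arr i j ≠ 0 → getCell arr i j ≤ (d0 : Int)

theorem grid_valid (m arr : List (List Int)) (w h : Int)
    (hw : (m.length : Int) = w) (hrows : ∀ r ∈ m, h ≤ (r.length : Int))
    (hshape : arr.map List.length = m.map List.length)
    {i j : Int} (hij : inb w h i j) :
    i.toNat < arr.length ∧ j.toNat < (arr.getD i.toNat []).length := by
  obtain ⟨h0i, hiw, h0j, hjh⟩ := hij
  have hlen : arr.length = m.length := by
    have := congrArg List.length hshape
    simpa using this
  have hiw' : i.toNat < arr.length := by omega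
  refine ⟨hiw', ?_⟩
  have him : i.toNat < m.length := by omega
  have hrowlen : (arr.getD i.toNat []).length = m[i.toNat].length := by
    have h1 : arr.getD i.toNat [] = arr[i.toNat] := by
      rw [List.getD_eq_getElem?_getD, List.getElem?_eq_getElem hiw']; rfl
    have h2 : (arr.map List.length)[i.toNat]'(by simpa using hiw') =
        (m.map List.length)[i.toNat]'(by simpa using him) := by
      congr 1
    rw [List.getElem_map, List.getElem_map] at h2
    rw [h1, h2]
  have hmem : m[i.toNat] ∈ m := List.getElem_mem him
  have := hrows _ hmem
  omega

-- the value a cell gets when it is marked by the pop of a level-d0 entry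
theorem markedDV (m : List (List Int)) (w h si sj : Int) (d0 : ℕ) (c b : List (Int × Int × Int))
    (arr : List (List Int)) (inv : InvA m w h si sj d0 c b arr) {i j : Int}
    (hin : inb w h i j) (hlv : specLvl m w h si sj (d0 - 1) i j = true)
    (h0 : getCell arr i j = 0) :
    DV m w h si sj i j = (d0 : Int) := by
  have := DV_eq_iff m w h si sj i j (d0 - 1)
    ⟨hlv, fun k hk => by
      by_contra hlt
      exact (inv.i3 k i j hin hk (by omega)) h0⟩
  rw [this]
  have := inv.hd0
  omega

theorem transA (m : List (List Int)) (w h si sj : Int) (d0 : ℕ) (b : List (Int × Int × Int))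
    (arr : List (List Int)) (inv : InvA m w h si sj d0 [] b arr) :
    InvA m w h si sj (d0 + 1) b [] arr := by
  have hsucc : d0 - 1 + 1 = d0 := by have := inv.hd0; omega
  refine ⟨inv.hw, inv.hrows, inv.hshape, by omega, ?_, ?_, inv.i1, ?_, ?_, ?_, ?_, ?_, ?_, ?_⟩
  · intro e he; have := inv.hb e he; omega
  · intro e he; simp at he
  · intro e he hin
    have := inv.i2b e he
    simpa using this hin
  · intro e he; simp at he
  · -- i3
    intro k i j hin hk hkle
    rcases Nat.lt_or_ge (k + 2) (d0 + 1) with hlt | hge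
    · exact inv.i3 k i j hin hk (by omega)
    · have hk' : k = d0 - 1 := by omega
      by_contra hmk
      have := inv.i4a i j hin (hk' ▸ hk) hmk
      simp at this
  · -- i4a
    intro i j hin hlv h0
    have hlv' : specLvl m w h si sj d0 i j = true := by simpa using hlv
    by_cases hlow : specLvl m w h si sj (d0 - 1) i j = true
    · have := inv.i4a i j hin hlow h0
      simp at this
    · rcases inv.i4b i j hin hlv' (by simpa using hlow) h0 with hmem | ⟨p, hp, hpin, hpo, hplv, hp0⟩
      · have : ((d0 : Int) + 1) = (((d0 + 1 : ℕ)) : Int) := by push_cast; ring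
        exact this ▸ hmem
      · have := inv.i4a p.1 p.2 hpin hplv hp0
        simp at this
  · -- i4b
    intro i j hin hlv hlow h0
    rcases (specLvl_succ_iff m w h si sj d0 i j).1 hlv with hold | ⟨_, p, hp, hplv, hpo⟩
    · rw [show d0 + 1 - 1 = d0 from rfl] at hlow
      rw [hold] at hlow; cases hlow
    · right
      refine ⟨p, hp, specLvl_inb m w h si sj hplv, hpo, by simpa using hplv, ?_⟩
      -- p is still unmarked: a marked p would carry value DV p = d0+1 > d0, contradicting i6
      by_contra hpne
      have hpmk : getCell arr p.1 p.2 ≠ 0 := hpne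
      have hpin := specLvl_inb m w h si sj hplv
      have hval := inv.i1 p.1 p.2 hpin hpmk
      have hle := inv.i6 p.1 p.2 hpin hpmk
      have hDVle : DV m w h si sj p.1 p.2 ≤ (d0 : Int) + 1 := DV_le m w h si sj p.1 p.2 hplv
      have hreach : reachS m w h si sj p.1 p.2 := ⟨d0, hplv⟩
      by_cases hDVlow : DV m w h si sj p.1 p.2 ≤ ((d0 - 1 : ℕ) : Int) + 1
      · have hplow : specLvl m w h si sj (d0 - 1) p.1 p.2 = true :=
          specLvl_DV_le m w h si sj p.1 p.2 hreach hDVlow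
        have : specLvl m w h si sj (d0 - 1 + 1) i j = true :=
          specLvl_adj m w h si sj hplow hpo hin hp
        rw [hsucc] at this
        rw [show d0 + 1 - 1 = d0 from rfl] at hlow
        rw [this] at hlow; cases hlow
      · have hsu : ((d0 - 1 : ℕ) : Int) + 1 = (d0 : Int) := by
          have := inv.hd0; omega
        rw [hsu] at hDVlow
        omega
  · -- i5
    intro i j hin hmk hop p hp hpin
    rcases inv.i5 i j hin hmk hop p hp hpin with h | ⟨d, hd⟩
    · exact Or.inl h
    · right; exact ⟨d, by simpa using hd⟩
  · -- i6
    intro i j hin hmk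
    have := inv.i6 i j hin hmk
    have hc : ((d0 : ℕ) : Int) ≤ ((d0 + 1 : ℕ) : Int) := by push_cast; omega
    omega

theorem finalA (m : List (List Int)) (w h si sj : Int) (d0 : ℕ) (arr : List (List Int))
    (inv : InvA m w h si sj d0 [] [] arr) :
    ∀ i j : Int, inb w h i j → getCell arr i j = DV m w h si sj i j := by
  have claim1 : ∀ (k : ℕ) (i j : Int), inb w h i j →
      specLvl m w h si sj k i j = true → getCell arr i j ≠ 0 := by
    intro k
    induction k with
    | zero =>
      intro i j hin hlv
      by_contra hmk
      have h0 : getCell arr i j = 0 := hmk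
      have hup : specLvl m w h si sj (d0 - 1) i j = true :=
        specLvl_mono m w h si sj (Nat.zero_le _) hlv
      have := inv.i4a i j hin hup h0
      simp at this
    | succ k ih =>
      intro i j hin hlv
      rcases (specLvl_succ_iff m w h si sj k i j).1 hlv with hold | ⟨_, p, hp, hplv, hpo⟩
      · exact ih i j hin hold
      · have hpin := specLvl_inb m w h si sj hplv
        have hpmk := ih p.1 p.2 hpin hplv
        rcases inv.i5 p.1 p.2 hpin hpmk hpo (i, j) (mem_nbrs_comm hp) hin with hmk | ⟨d, hd⟩
        · exact hmk
        · simp at hd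
  intro i j hin
  by_cases hmk : getCell arr i j ≠ 0
  · exact inv.i1 i j hin hmk
  · have h0 : getCell arr i j = 0 := by by_contra hne; exact hmk hne
    rw [h0]
    by_cases hr : reachS m w h si sj i j
    · obtain ⟨k, hk⟩ := hr
      exact absurd (claim1 k i j hin hk) (by simpa using h0)
    · rw [DV_of_not_reach m w h si sj i j hr]

theorem popA (m : List (List Int)) (w h si sj : Int) (fuel : ℕ)
    (IH : ∀ (d0' : ℕ) (c' b' : List (Int × Int × Int)) (arr' : List (List Int)),
      InvA m w h si sj d0' c' b' arr' →
      (c' ++ b').length + 4 * zeros arr' ≤ fuel →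
      ∀ i j : Int, inb w h i j →
        getCell (fillLoopA m w h fuel (c' ++ b') arr') i j = DV m w h si sj i j)
    (d0 : ℕ) (d i0 j0 : Int) (ctail b : List (Int × Int × Int)) (arr : List (List Int))
    (inv : InvA m w h si sj d0 ((d, i0, j0) :: ctail) b arr)
    (hbud : (((d, i0, j0) :: ctail) ++ b).length + 4 * zeros arr ≤ fuel + 1) :
    ∀ i j : Int, inb w h i j →
      getCell (fillLoopA m w h (fuel + 1) (((d, i0, j0) :: ctail) ++ b) arr) i j =
        DV m w h si sj i j := by
  intro i j hij
  have hd : d = (d0 : Int) := inv.hc (d, i0, j0) (List.mem_cons_self ..)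
  subst hd
  have hsucc : d0 - 1 + 1 = d0 := by have := inv.hd0; omega
  have hbudlen : ctail.length + b.length + 1 + 4 * zeros arr ≤ fuel + 1 := by
    simp only [List.cons_append, List.length_cons, List.length_append] at hbud
    omega
  rw [List.cons_append, fillLoopA]
  by_cases hcond : inb w h i0 j0 ∧ getCell arr i0 j0 = 0
  · rw [if_pos hcond]
    obtain ⟨hin0, h00⟩ := hcond
    have hvalid := grid_valid m arr w h inv.hw inv.hrows inv.hshape hin0
    have h0i : 0 ≤ i0 := hin0.1
    have h0j : 0 ≤ j0 := hin0.2.2.1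
    have hd0ne : ((d0 : ℕ) : Int) ≠ 0 := by have := inv.hd0; omega
    have hlv0 : specLvl m w h si sj (d0 - 1) i0 j0 = true :=
      inv.i2c (((d0 : ℕ) : Int), i0, j0) (List.mem_cons_self ..) hin0
    have hDVij : DV m w h si sj i0 j0 = (d0 : Int) :=
      markedDV m w h si sj d0 _ b arr inv hin0 hlv0 h00
    have hself : getCell (setCell arr i0 j0 (d0 : Int)) i0 j0 = (d0 : Int) :=
      getCell_setCell_self arr i0 j0 _ h0i h0j hvalid.1 hvalid.2
    have hselfne : getCell (setCell arr i0 j0 (d0 : Int)) i0 j0 ≠ 0 := by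
      rw [hself]; exact hd0ne
    have hother : ∀ a b' : Int, 0 ≤ a → 0 ≤ b' → ¬(a = i0 ∧ b' = j0) →
        getCell (setCell arr i0 j0 (d0 : Int)) a b' = getCell arr a b' := by
      intro a b' ha hb' hne
      exact getCell_setCell_ne arr i0 j0 _ a b' h0i h0j ha hb' hne
    have hmark : ∀ a b' : Int, inb w h a b' → getCell arr a b' ≠ 0 →
        getCell (setCell arr i0 j0 (d0 : Int)) a b' ≠ 0 := by
      intro a b' hab hne
      by_cases he : a = i0 ∧ b' = j0
      · obtain ⟨rfl, rfl⟩ := he; exact hselfne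
      · rw [hother a b' hab.1 hab.2.2.1 he]; exact hne
    have hshape' : (setCell arr i0 j0 (d0 : Int)).map List.length = m.map List.length := by
      rw [map_length_setCell arr i0 j0 _ h0i hvalid.1]; exact inv.hshape
    have hzero : zeros (setCell arr i0 j0 (d0 : Int)) + 1 = zeros arr :=
      zeros_setCell arr i0 j0 _ h0i h0j hvalid.1 hvalid.2 h00 hd0ne
    have hi1' : ∀ a b' : Int, inb w h a b' → getCell (setCell arr i0 j0 (d0 : Int)) a b' ≠ 0 →
        getCell (setCell arr i0 j0 (d0 : Int)) a b' = DV m w h si sj a b' := by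
      intro a b' hab hne
      by_cases he : a = i0 ∧ b' = j0
      · obtain ⟨rfl, rfl⟩ := he; rw [hself, hDVij]
      · rw [hother a b' hab.1 hab.2.2.1 he] at hne ⊢
        exact inv.i1 a b' hab hne
    have hi3' : ∀ (k : ℕ) (a b' : Int), inb w h a b' → specLvl m w h si sj k a b' = true →
        k + 2 ≤ d0 → getCell (setCell arr i0 j0 (d0 : Int)) a b' ≠ 0 := by
      intro k a b' hab hk hkle
      exact hmark a b' hab (inv.i3 k a b' hab hk hkle)
    have hi6' : ∀ a b' : Int, inb w h a b' → getCell (setCell arr i0 j0 (d0 : Int)) a b' ≠ 0 →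
        getCell (setCell arr i0 j0 (d0 : Int)) a b' ≤ (d0 : Int) := by
      intro a b' hab hne
      by_cases he : a = i0 ∧ b' = j0
      · obtain ⟨rfl, rfl⟩ := he; rw [hself]
      · rw [hother a b' hab.1 hab.2.2.1 he] at hne ⊢
        exact inv.i6 a b' hab hne
    by_cases hop : cellA m i0 j0 = 0
    · rw [if_pos hop]
      have hP : ∀ e' ∈ [((d0 : Int)+1, i0-1, j0), ((d0 : Int)+1, i0+1, j0),
          ((d0 : Int)+1, i0, j0-1), ((d0 : Int)+1, i0, j0+1)],
          e'.1 = (d0 : Int) + 1 ∧ (e'.2.1, e'.2.2) ∈ nbrs i0 j0 := by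
        intro e' he'
        fin_cases he' <;> simp [nbrs]
      have hPmem : ∀ p : Int × Int, p ∈ nbrs i0 j0 →
          ((d0 : Int)+1, p.1, p.2) ∈ [((d0 : Int)+1, i0-1, j0), ((d0 : Int)+1, i0+1, j0),
            ((d0 : Int)+1, i0, j0-1), ((d0 : Int)+1, i0, j0+1)] := by
        intro p hp
        fin_cases hp <;> simp
      have inv' : InvA m w h si sj d0 ctail
          (b ++ [((d0 : Int)+1, i0-1, j0), ((d0 : Int)+1, i0+1, j0),
            ((d0 : Int)+1, i0, j0-1), ((d0 : Int)+1, i0, j0+1)])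
          (setCell arr i0 j0 (d0 : Int)) := by
        refine ⟨inv.hw, inv.hrows, hshape', inv.hd0, ?_, ?_, hi1', ?_, ?_, hi3', ?_, ?_, ?_, hi6'⟩
        · intro e he; exact inv.hc e (List.mem_cons_of_mem _ he)
        · intro e he
          rcases List.mem_append.1 he with hb | hp
          · exact inv.hb e hb
          · exact (hP e hp).1
        · intro e he; exact inv.i2c e (List.mem_cons_of_mem _ he)
        · intro e he hein
          rcases List.mem_append.1 he with hb | hp
          · exact inv.i2b e hb hein
          · have := specLvl_adj m w h si sj hlv0 hop hein (mem_nbrs_comm (hP e hp).2)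
            rw [hsucc] at this
            exact this
        · -- i4a
          intro a b' hab hlv h0'
          have hne : ¬(a = i0 ∧ b' = j0) := by
            rintro ⟨rfl, rfl⟩; exact hselfne h0'
          rw [hother a b' hab.1 hab.2.2.1 hne] at h0'
          have := inv.i4a a b' hab hlv h0'
          rcases List.mem_cons.1 this with he | hm
          · exfalso; apply hne
            have h1 := congrArg (fun x : Int × Int × Int => x.2.1) he
            have h2 := congrArg (fun x : Int × Int × Int => x.2.2) he
            exact ⟨h1, h2⟩
          · exact hm
        · -- i4b
          intro a b' hab hlv hlow h0'
          have hne : ¬(a = i0 ∧ b' = j0) := by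
            rintro ⟨rfl, rfl⟩; exact hselfne h0'
          rw [hother a b' hab.1 hab.2.2.1 hne] at h0'
          rcases inv.i4b a b' hab hlv hlow h0' with hm | ⟨p, hp, hpin, hpo, hplv, hp0⟩
          · exact Or.inl (List.mem_append_left _ hm)
          · by_cases hpe : p.1 = i0 ∧ p.2 = j0
            · left
              apply List.mem_append_right
              have hnb : (a, b') ∈ nbrs i0 j0 := by
                have : (i0, j0) ∈ nbrs a b' := by
                  have : p = (i0, j0) := Prod.ext hpe.1 hpe.2
                  rw [← this]
                  simpa using hp
                exact mem_nbrs_comm this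
              exact hPmem (a, b') hnb
            · right
              refine ⟨p, hp, hpin, hpo, hplv, ?_⟩
              rw [hother p.1 p.2 hpin.1 hpin.2.2.1 hpe]
              exact hp0
        · -- i5
          intro a b' hab hne hao p hp hpin
          by_cases he : a = i0 ∧ b' = j0
          · obtain ⟨rfl, rfl⟩ := he
            right
            exact ⟨(d0 : Int) + 1, List.mem_append_right _ (List.mem_append_right _ (hPmem p hp))⟩
          · rw [hother a b' hab.1 hab.2.2.1 he] at hne
            rcases inv.i5 a b' hab hne hao p hp hpin with hpmk | ⟨dd, hdd⟩
            · exact Or.inl (hmark p.1 p.2 hpin hpmk)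
            · rcases List.mem_append.1 hdd with hdc | hdb
              · rcases List.mem_cons.1 hdc with heq | hm
                · left
                  have h1 := congrArg (fun x : Int × Int × Int => x.2.1) heq
                  have h2 := congrArg (fun x : Int × Int × Int => x.2.2) heq
                  simp only at h1 h2
                  rw [h1, h2]
                  exact hselfne
                · exact Or.inr ⟨dd, List.mem_append_left _ hm⟩
              · exact Or.inr ⟨dd, List.mem_append_right _ (List.mem_append_left _ hdb)⟩
      rw [List.append_assoc]
      apply IH d0 ctail _ _ inv' _ i j hij
      have hl : ∀ (l1 l2 : List (Int × Int × Int)), (l1 ++ l2).length = l1.length + l2.length :=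
        fun l1 l2 => List.length_append
      simp only [hl, List.length_cons, List.length_nil]
      omega
    · rw [if_neg hop]
      have inv' : InvA m w h si sj d0 ctail b (setCell arr i0 j0 (d0 : Int)) := by
        refine ⟨inv.hw, inv.hrows, hshape', inv.hd0, ?_, inv.hb, hi1', ?_, inv.i2b, hi3', ?_, ?_, ?_, hi6'⟩
        · intro e he; exact inv.hc e (List.mem_cons_of_mem _ he)
        · intro e he; exact inv.i2c e (List.mem_cons_of_mem _ he)
        · -- i4a
          intro a b' hab hlv h0'
          have hne : ¬(a = i0 ∧ b' = j0) := by
            rintro ⟨rfl, rfl⟩; exact hselfne h0'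
          rw [hother a b' hab.1 hab.2.2.1 hne] at h0'
          have := inv.i4a a b' hab hlv h0'
          rcases List.mem_cons.1 this with he | hm
          · exfalso; apply hne
            have h1 := congrArg (fun x : Int × Int × Int => x.2.1) he
            have h2 := congrArg (fun x : Int × Int × Int => x.2.2) he
            exact ⟨h1, h2⟩
          · exact hm
        · -- i4b
          intro a b' hab hlv hlow h0'
          have hne : ¬(a = i0 ∧ b' = j0) := by
            rintro ⟨rfl, rfl⟩; exact hselfne h0'
          rw [hother a b' hab.1 hab.2.2.1 hne] at h0'
          rcases inv.i4b a b' hab hlv hlow h0' with hm | ⟨p, hp, hpin, hpo, hplv, hp0⟩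
          · exact Or.inl hm
          · have hpe : ¬(p.1 = i0 ∧ p.2 = j0) := by
              rintro ⟨hp1, hp2⟩
              apply hop
              rw [← hp1, ← hp2]
              exact hpo
            right
            refine ⟨p, hp, hpin, hpo, hplv, ?_⟩
            rw [hother p.1 p.2 hpin.1 hpin.2.2.1 hpe]
            exact hp0
        · -- i5
          intro a b' hab hne hao p hp hpin
          by_cases he : a = i0 ∧ b' = j0
          · exfalso
            obtain ⟨rfl, rfl⟩ := he
            exact hop hao
          · rw [hother a b' hab.1 hab.2.2.1 he] at hne
            rcases inv.i5 a b' hab hne hao p hp hpin with hpmk | ⟨dd, hdd⟩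
            · exact Or.inl (hmark p.1 p.2 hpin hpmk)
            · rcases List.mem_append.1 hdd with hdc | hdb
              · rcases List.mem_cons.1 hdc with heq | hm
                · left
                  have h1 := congrArg (fun x : Int × Int × Int => x.2.1) heq
                  have h2 := congrArg (fun x : Int × Int × Int => x.2.2) heq
                  simp only at h1 h2
                  rw [h1, h2]
                  exact hselfne
                · exact Or.inr ⟨dd, List.mem_append_left _ hm⟩
              · exact Or.inr ⟨dd, List.mem_append_right _ hdb⟩
      apply IH d0 ctail b _ inv' _ i j hij
      simp only [List.length_append]
      omega
  · rw [if_neg hcond]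
    have inv' : InvA m w h si sj d0 ctail b arr := by
      refine ⟨inv.hw, inv.hrows, inv.hshape, inv.hd0, ?_, inv.hb, inv.i1, ?_, inv.i2b, inv.i3, ?_, ?_, ?_, inv.i6⟩
      · intro e he; exact inv.hc e (List.mem_cons_of_mem _ he)
      · intro e he; exact inv.i2c e (List.mem_cons_of_mem _ he)
      · -- i4a
        intro a b' hab hlv h0'
        have := inv.i4a a b' hab hlv h0'
        rcases List.mem_cons.1 this with he | hm
        · exfalso
          apply hcond
          have h1 := congrArg (fun x : Int × Int × Int => x.2.1) he
          have h2 := congrArg (fun x : Int × Int × Int => x.2.2) he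
          simp only at h1 h2
          rw [← h1, ← h2]
          exact ⟨hab, h0'⟩
        · exact hm
      · -- i4b
        intro a b' hab hlv hlow h0'
        exact inv.i4b a b' hab hlv hlow h0'
      · -- i5
        intro a b' hab hne hao p hp hpin
        rcases inv.i5 a b' hab hne hao p hp hpin with hpmk | ⟨dd, hdd⟩
        · exact Or.inl hpmk
        · rcases List.mem_append.1 hdd with hdc | hdb
          · rcases List.mem_cons.1 hdc with heq | hm
            · left
              have h1 := congrArg (fun x : Int × Int × Int => x.2.1) heq
              have h2 := congrArg (fun x : Int × Int × Int => x.2.2) heq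
              simp only at h1 h2
              rw [h1, h2]
              by_cases hmm : getCell arr i0 j0 = 0
              · exact absurd ⟨by rw [← h1, ← h2]; exact hpin, hmm⟩ hcond
              · exact hmm
            · exact Or.inr ⟨dd, List.mem_append_left _ hm⟩
          · exact Or.inr ⟨dd, List.mem_append_right _ hdb⟩
    apply IH d0 ctail b arr inv' _ i j hij
    simp only [List.length_append]
    omega

theorem mainA (m : List (List Int)) (w h si sj : Int) :
    ∀ (fuel : ℕ) (d0 : ℕ) (c b : List (Int × Int × Int)) (arr : List (List Int)),
      InvA m w h si sj d0 c b arr →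
      (c ++ b).length + 4 * zeros arr ≤ fuel →
      ∀ i j : Int, inb w h i j →
        getCell (fillLoopA m w h fuel (c ++ b) arr) i j = DV m w h si sj i j := by
  intro fuel
  induction fuel with
  | zero =>
    intro d0 c b arr inv hbud i j hij
    have hc0 : c = [] ∧ b = [] := by
      constructor <;> (cases c <;> cases b <;> simp_all [List.length_append])
    obtain ⟨rfl, rfl⟩ := hc0
    exact finalA m w h si sj d0 arr inv i j hij
  | succ fuel ih =>
    intro d0 c b arr inv hbud i j hij
    cases c with
    | cons e ctail =>
      obtain ⟨d, i0, j0⟩ := e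
      exact popA m w h si sj fuel ih d0 d i0 j0 ctail b arr inv hbud i j hij
    | nil =>
      cases b with
      | nil =>
        exact finalA m w h si sj d0 arr inv i j hij
      | cons e btail =>
        obtain ⟨d, i0, j0⟩ := e
        have inv' := transA m w h si sj d0 _ arr inv
        have := popA m w h si sj fuel ih (d0 + 1) d i0 j0 btail [] arr inv'
          (by simpa [List.length_append] using hbud) i j hij
        simpa using this

theorem getCell_zeroGrid (m : List (List Int)) (i j : Int) :
    getCell (m.map (fun r => r.map (fun _ => (0 : Int)))) i j = 0 := by
  unfold getCell
  cases hrow : PySem.List.pyGet? (m.map (fun r => r.map (fun _ => (0 : Int)))) i with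
  | none => simp [PySem.List.pyGet?]
  | some r =>
    have hr : r ∈ m.map (fun r => r.map (fun _ => (0 : Int))) :=
      PySem.List.mem_of_pyGet?_eq_some _ hrow
    obtain ⟨r0, _, rfl⟩ := List.mem_map.1 hr
    simp only [Option.getD_some]
    cases hv : PySem.List.pyGet? (r0.map (fun _ => (0 : Int))) j with
    | none => rfl
    | some v =>
      have hv' : v ∈ r0.map (fun _ => (0 : Int)) := PySem.List.mem_of_pyGet?_eq_some _ hv
      obtain ⟨_, _, rfl⟩ := List.mem_map.1 hv'
      rfl

theorem zeros_zeroGrid (m : List (List Int)) :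
    zeros (m.map (fun r => r.map (fun _ => (0 : Int)))) = (m.map List.length).sum := by
  unfold zeros
  rw [List.map_map]
  congr 1
  apply List.map_congr_left
  intro r _
  simp only [Function.comp_apply]
  rw [List.countP_eq_length.2 (by intro a ha; obtain ⟨_, _, rfl⟩ := List.mem_map.1 ha; rfl)]
  simp

theorem fillA_spec (m : List (List Int)) (w h si sj : Int)
    (hw : (m.length : Int) = w) (hrows : ∀ r ∈ m, h ≤ (r.length : Int))
    (hin : inb w h si sj) :
    ∀ i j : Int, inb w h i j →
      getCell (fillA m w h si sj) i j = DV m w h si sj i j := by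
  have hz : ∀ i j : Int, getCell (m.map (fun r => r.map (fun _ => (0 : Int)))) i j = 0 :=
    getCell_zeroGrid m
  have inv : InvA m w h si sj 1 [(1, si, sj)] [] (m.map (fun r => r.map (fun _ => (0 : Int)))) := by
    refine ⟨hw, hrows, by simp, le_refl 1, ?_, ?_, ?_, ?_, ?_, ?_, ?_, ?_, ?_, ?_⟩
    · intro e he; simp at he; rw [he]; rfl
    · intro e he; simp at he
    · intro i j hij hne; exact absurd (hz i j) hne
    · intro e he hein
      simp at he
      rw [he]
      simp only []
      rw [show (1 : ℕ) - 1 = 0 from rfl]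
      exact (specLvl_zero_iff m w h si sj si sj).2 ⟨by rw [he] at hein; exact hein, rfl, rfl⟩
    · intro e he; simp at he
    · intro k i j hij hk hkle; omega
    · intro i j hij hlv h0
      rw [show (1 : ℕ) - 1 = 0 from rfl] at hlv
      obtain ⟨_, rfl, rfl⟩ := (specLvl_zero_iff m w h si sj i j).1 hlv
      simp
    · intro i j hij hlv hlow h0
      rw [show (1 : ℕ) - 1 = 0 from rfl] at hlow
      rcases (specLvl_succ_iff m w h si sj 0 i j).1 hlv with hold | ⟨_, p, hp, hplv, hpo⟩
      · rw [hold] at hlow; cases hlow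
      · right
        refine ⟨p, hp, specLvl_inb m w h si sj hplv, hpo, ?_, hz p.1 p.2⟩
        rw [show (1 : ℕ) - 1 = 0 from rfl]
        exact hplv
    · intro i j hij hne; exact absurd (hz i j) hne
    · intro i j hij hne; exact absurd (hz i j) hne
  have hbud : (([(1, si, sj)] ++ []) ++ []).length + 4 * zeros (m.map (fun r => r.map (fun _ => (0 : Int))))
      ≤ 1 + 4 * (m.map List.length).sum := by
    rw [zeros_zeroGrid m]
    simp
  intro i j hij
  have := mainA m w h si sj (1 + 4 * (m.map List.length).sum) 1 [(1, si, sj)] []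
    (m.map (fun r => r.map (fun _ => (0 : Int)))) inv (by simpa using hbud) i j hij
  unfold fillA
  simpa using this

-- ===== B side: relaxation sweeps =====

-- the contents of a B grid after r sweeps: DV truncated to cells reached within r rounds
noncomputable def TDV (m : List (List Int)) (w h si sj : Int) (r : ℕ) (i j : Int) : Int :=
  if specLvl m w h si sj r i j = true then DV m w h si sj i j else 0

theorem TDV_nonneg (m : List (List Int)) (w h si sj : Int) (r : ℕ) (i j : Int) :
    0 ≤ TDV m w h si sj r i j := by
  unfold TDV; split
  · exact DV_nonneg m w h si sj i j
  · exact le_refl 0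

theorem TDV_ne_zero_iff (m : List (List Int)) (w h si sj : Int) (r : ℕ) (i j : Int) :
    TDV m w h si sj r i j ≠ 0 ↔ specLvl m w h si sj r i j = true := by
  unfold TDV
  split
  · simp_all [DV_ne_zero_iff]
    exact ⟨r, by assumption⟩
  · simp_all

theorem getCell_grid (W H : ℕ) (g : ℕ → ℕ → Int) (i j : Int)
    (hi : 0 ≤ i) (hiW : i.toNat < W) (hj : 0 ≤ j) (hjH : j.toNat < H) :
    getCell ((List.range W).map (fun a => (List.range H).map (fun b => g a b))) i j =
      g i.toNat j.toNat := by
  rw [getCell_nonneg_eq _ _ _ hi hj]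
  simp [List.getD_eq_getElem?_getD, hiW, hjH]

theorem getCell_elem (arr : List (List Int)) (n k : ℕ) (hn : n < arr.length)
    (hk : k < arr[n].length) :
    getCell arr (n : Int) (k : Int) = arr[n][k] := by
  rw [getCell_nonneg_eq _ _ _ (by omega) (by omega)]
  simp only [Int.toNat_natCast, List.getD_eq_getElem?_getD]
  rw [List.getElem?_eq_getElem hn]
  simp only [Option.getD_some]
  rw [List.getElem?_eq_getElem hk]
  rfl

-- state after r sweeps
def MB (m : List (List Int)) (w h si sj : Int) (r : ℕ) (arr : List (List Int)) : Prop :=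
  arr.length = w.toNat ∧ (∀ row ∈ arr, row.length = h.toNat) ∧
  ∀ i j : Int, inb w h i j → getCell arr i j = TDV m w h si sj r i j

theorem getCell_initB (w h si sj : Int) {i j : Int} (hij : inb w h i j) :
    getCell (initB w h si sj) i j = if i = si ∧ j = sj then 1 else 0 := by
  obtain ⟨h0i, hiw, h0j, hjh⟩ := hij
  unfold initB
  rw [getCell_grid _ _ _ i j h0i (by omega) h0j (by omega)]
  have e1 : ((i.toNat : ℕ) : Int) = i := Int.toNat_of_nonneg h0i
  have e2 : ((j.toNat : ℕ) : Int) = j := Int.toNat_of_nonneg h0j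
  rw [e1, e2]

theorem getCell_stepB (m arr : List (List Int)) (w h : Int) {i j : Int} (hij : inb w h i j) :
    getCell (stepB m arr w h) i j = relaxB m arr w h i j := by
  obtain ⟨h0i, hiw, h0j, hjh⟩ := hij
  unfold stepB
  rw [getCell_grid _ _ _ i j h0i (by omega) h0j (by omega)]
  rw [Int.toNat_of_nonneg h0i, Int.toNat_of_nonneg h0j]

theorem relax_spec (m : List (List Int)) (w h si sj : Int) (r : ℕ) (arr : List (List Int))
    (hMB : MB m w h si sj r arr) {i j : Int} (hij : inb w h i j) :
    relaxB m arr w h i j = TDV m w h si sj (r + 1) i j := by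
  obtain ⟨hlen, hrowlen, hpt⟩ := hMB
  unfold relaxB
  by_cases hmk : specLvl m w h si sj r i j = true
  · have hne : getCell arr i j ≠ 0 := by
      rw [hpt i j hij]; exact (TDV_ne_zero_iff m w h si sj r i j).2 hmk
    rw [if_pos hne, hpt i j hij]
    unfold TDV
    rw [if_pos hmk, if_pos (specLvl_mono m w h si sj (Nat.le_succ r) hmk)]
  · have h0 : getCell arr i j = 0 := by
      rw [hpt i j hij]
      unfold TDV
      rw [if_neg hmk]
    rw [if_neg (by simpa using h0)]
    show (match PySem.List.min? (((nbrs i j).filter (fun p =>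
        decide (inb w h p.1 p.2) && cellA m p.1 p.2 == 0 && decide (0 < getCell arr p.1 p.2))).map
        (fun p => getCell arr p.1 p.2)) (fun v => v) with
      | some v => v + 1
      | none => 0) = TDV m w h si sj (r + 1) i j
    have hmem : ∀ p : Int × Int, p ∈ (nbrs i j).filter (fun p =>
        decide (inb w h p.1 p.2) && cellA m p.1 p.2 == 0 && decide (0 < getCell arr p.1 p.2)) ↔
        (p ∈ nbrs i j ∧ inb w h p.1 p.2 ∧ cellA m p.1 p.2 = 0 ∧
          specLvl m w h si sj r p.1 p.2 = true) := by
      intro p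
      rw [List.mem_filter]
      simp only [Bool.and_eq_true, decide_eq_true_eq, beq_iff_eq]
      constructor
      · rintro ⟨hnb, ⟨⟨hinp, hop⟩, hpos⟩⟩
        refine ⟨hnb, hinp, hop, ?_⟩
        rw [← TDV_ne_zero_iff m w h si sj r p.1 p.2, ← hpt p.1 p.2 hinp]
        omega
      · rintro ⟨hnb, hinp, hop, hlv⟩
        refine ⟨hnb, ⟨⟨hinp, hop⟩, ?_⟩⟩
        have := (TDV_ne_zero_iff m w h si sj r p.1 p.2).2 hlv
        rw [← hpt p.1 p.2 hinp] at this
        have h2 := TDV_nonneg m w h si sj r p.1 p.2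
        rw [← hpt p.1 p.2 hinp] at h2
        omega
    -- every relevant neighbour was first reached exactly in round r, so carries value r+1
    have hval : ∀ p : Int × Int, p ∈ nbrs i j → inb w h p.1 p.2 → cellA m p.1 p.2 = 0 →
        specLvl m w h si sj r p.1 p.2 = true → getCell arr p.1 p.2 = (r : Int) + 1 := by
      intro p hnb hinp hop hlv
      have hr : reachS m w h si sj p.1 p.2 := ⟨r, hlv⟩
      have hfind_le : Nat.find hr ≤ r := Nat.find_min' hr hlv
      have hfind_ge : r ≤ Nat.find hr := by
        by_contra hlt
        have hfr : Nat.find hr + 1 ≤ r := by omega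
        have hadj : specLvl m w h si sj (Nat.find hr + 1) i j = true :=
          specLvl_adj m w h si sj (Nat.find_spec hr) hop hij hnb
        exact hmk (specLvl_mono m w h si sj hfr hadj)
      have hfind : Nat.find hr = r := by omega
      rw [hpt p.1 p.2 hinp]
      unfold TDV
      rw [if_pos hlv, DV_of_reach m w h si sj p.1 p.2 hr, hfind]
    cases hmin : PySem.List.min? (((nbrs i j).filter (fun p =>
        decide (inb w h p.1 p.2) && cellA m p.1 p.2 == 0 && decide (0 < getCell arr p.1 p.2))).map
        (fun p => getCell arr p.1 p.2)) (fun v => v) with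
    | none =>
      -- no candidates: no open reached neighbour, so (i,j) is not reached in round r+1 either
      have hnil := (PySem.List.min?_eq_none_iff _ _).1 hmin
      rw [List.map_eq_nil_iff] at hnil
      have hlv1 : specLvl m w h si sj (r + 1) i j ≠ true := by
        intro hlv1
        rcases (specLvl_succ_iff m w h si sj r i j).1 hlv1 with hold | ⟨_, p, hp, hplv, hpo⟩
        · exact hmk hold
        · have hpin := specLvl_inb m w h si sj hplv
          have hpfil := (hmem p).2 ⟨hp, hpin, hpo, hplv⟩
          rw [hnil] at hpfil
          simp at hpfil
      show (0 : Int) = TDV m w h si sj (r + 1) i j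
      unfold TDV
      rw [if_neg hlv1]
    | some v =>
      -- a candidate exists, and every candidate carries value r+1
      have hvmem := PySem.List.min?_mem hmin
      obtain ⟨p0, hp0fil, hp0v⟩ := List.mem_map.1 hvmem
      obtain ⟨hp0nb, hp0in, hp0op, hp0lv⟩ := (hmem p0).1 hp0fil
      have hv : v = (r : Int) + 1 := by
        rw [← hp0v]
        exact hval p0 hp0nb hp0in hp0op hp0lv
      have hlv1 : specLvl m w h si sj (r + 1) i j = true :=
        specLvl_adj m w h si sj hp0lv hp0op hij hp0nb
      have hDV : DV m w h si sj i j = ((r + 1 : ℕ) : Int) + 1 := by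
        apply DV_eq_iff
        refine ⟨hlv1, fun k hk => ?_⟩
        by_contra hlt
        exact hmk (specLvl_mono m w h si sj (by omega) hk)
      show v + 1 = TDV m w h si sj (r + 1) i j
      unfold TDV
      rw [if_pos hlv1, hDV, hv]
      push_cast
      ring

theorem MB_step (m : List (List Int)) (w h si sj : Int) (r : ℕ) (arr : List (List Int))
    (hMB : MB m w h si sj r arr) : MB m w h si sj (r + 1) (stepB m arr w h) := by
  refine ⟨by simp [stepB], ?_, ?_⟩
  · intro row hrow
    unfold stepB at hrow
    obtain ⟨a, _, rfl⟩ := List.mem_map.1 hrow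
    simp
  · intro i j hij
    rw [getCell_stepB m arr w h hij]
    exact relax_spec m w h si sj r arr hMB hij

theorem specLvl_congr_succ (m : List (List Int)) (w h si sj : Int) (k1 k2 : ℕ)
    (hk : ∀ i j : Int, specLvl m w h si sj k1 i j = specLvl m w h si sj k2 i j) :
    ∀ i j : Int, specLvl m w h si sj (k1 + 1) i j = specLvl m w h si sj (k2 + 1) i j := by
  intro i j
  rw [specLvl_succ, specLvl_succ, hk i j]
  have hany : (nbrs i j).any (fun p => specLvl m w h si sj k1 p.1 p.2 && (cellA m p.1 p.2 == 0)) =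
      (nbrs i j).any (fun p => specLvl m w h si sj k2 p.1 p.2 && (cellA m p.1 p.2 == 0)) := by
    refine List.any_congr rfl ?_
    intro p
    rw [hk p.1 p.2]
  rw [hany]

theorem stable_DV (m : List (List Int)) (w h si sj : Int) (r : ℕ)
    (hstab : ∀ i j : Int, specLvl m w h si sj (r + 1) i j = specLvl m w h si sj r i j)
    {i j : Int} (hnlv : specLvl m w h si sj r i j ≠ true) :
    ¬ reachS m w h si sj i j := by
  rintro ⟨k, hk⟩
  have hall : ∀ l : ℕ, ∀ i' j' : Int,
      specLvl m w h si sj (r + l) i' j' = specLvl m w h si sj r i' j' := by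
    intro l
    induction l with
    | zero => intro i' j'; rfl
    | succ l ih =>
      intro i' j'
      have h1 := specLvl_congr_succ m w h si sj (r + l) r ih i' j'
      rw [show r + (l + 1) = r + l + 1 from rfl, h1, hstab i' j']
  rcases Nat.le_total k r with hkr | hrk
  · exact hnlv (specLvl_mono m w h si sj hkr hk)
  · have := hall (k - r) i j
    rw [show r + (k - r) = k by omega] at this
    rw [this] at hk
    exact hnlv hk

theorem stable_spec (m : List (List Int)) (w h si sj : Int) (r : ℕ) (arr : List (List Int))
    (hMB : MB m w h si sj r arr) (hstab : stepB m arr w h = arr) :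
    ∀ i j : Int, inb w h i j → getCell arr i j = DV m w h si sj i j := by
  have hMB' := MB_step m w h si sj r arr hMB
  have hpt' : ∀ i j : Int, inb w h i j →
      TDV m w h si sj (r + 1) i j = TDV m w h si sj r i j := by
    intro i j hij
    rw [← hMB'.2.2 i j hij, hstab, hMB.2.2 i j hij]
  have hS : ∀ i j : Int, specLvl m w h si sj (r + 1) i j = specLvl m w h si sj r i j := by
    intro i j
    by_cases hr : specLvl m w h si sj r i j = true
    · rw [hr, specLvl_mono m w h si sj (Nat.le_succ r) hr]
    · by_cases hr1 : specLvl m w h si sj (r + 1) i j = true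
      · have hinij := specLvl_inb m w h si sj hr1
        have := hpt' _ _ hinij
        unfold TDV at this
        rw [if_pos hr1, if_neg hr] at this
        have hDVne := (DV_ne_zero_iff m w h si sj i j).2 ⟨r + 1, hr1⟩
        exact absurd this hDVne
      · rw [Bool.eq_false_iff.2 hr1, Bool.eq_false_iff.2 hr]
  intro i j hij
  rw [hMB.2.2 i j hij]
  unfold TDV
  by_cases hr : specLvl m w h si sj r i j = true
  · rw [if_pos hr]
  · rw [if_neg hr, DV_of_not_reach m w h si sj i j (stable_DV m w h si sj r hS hr)]

-- counting reached cells, for the sweep bound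
def cntS (m : List (List Int)) (w h si sj : Int) (r : ℕ) : ℕ :=
  (((Finset.range w.toNat) ×ˢ (Finset.range h.toNat)).filter
    (fun p => specLvl m w h si sj r (p.1 : Int) (p.2 : Int) = true)).card

theorem cntS_le (m : List (List Int)) (w h si sj : Int) (r : ℕ) :
    cntS m w h si sj r ≤ w.toNat * h.toNat := by
  unfold cntS
  calc _ ≤ ((Finset.range w.toNat) ×ˢ (Finset.range h.toNat)).card := Finset.card_filter_le _ _
  _ = w.toNat * h.toNat := by rw [Finset.card_product]; simp

theorem cntS_strict (m : List (List Int)) (w h si sj : Int) (r : ℕ)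
    (hex : ∃ i j : Int, inb w h i j ∧ specLvl m w h si sj (r + 1) i j = true ∧
      specLvl m w h si sj r i j ≠ true) :
    cntS m w h si sj r < cntS m w h si sj (r + 1) := by
  obtain ⟨i, j, hij, hlv1, hlv0⟩ := hex
  apply Finset.card_lt_card
  constructor
  · intro x hx
    rw [Finset.mem_filter] at hx ⊢
    exact ⟨hx.1, specLvl_mono m w h si sj (Nat.le_succ r) hx.2⟩
  · intro hsub
    obtain ⟨h0i, hiw, h0j, hjh⟩ := hij
    have hmem : (i.toNat, j.toNat) ∈ ((Finset.range w.toNat) ×ˢ (Finset.range h.toNat)).filter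
        (fun p => specLvl m w h si sj (r + 1) (p.1 : Int) (p.2 : Int) = true) := by
      rw [Finset.mem_filter]
      refine ⟨?_, ?_⟩
      · rw [Finset.mem_product]
        simp only [Finset.mem_range]
        omega
      · simp only [Int.toNat_of_nonneg h0i, Int.toNat_of_nonneg h0j]
        exact hlv1
    have := hsub hmem
    rw [Finset.mem_filter] at this
    have h2 := this.2
    simp only [Int.toNat_of_nonneg h0i, Int.toNat_of_nonneg h0j] at h2
    exact hlv0 h2

theorem grid_ne_exists (w h : Int) (arr new : List (List Int))
    (ha1 : arr.length = w.toNat) (ha2 : ∀ row ∈ arr, row.length = h.toNat)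
    (hb1 : new.length = w.toNat) (hb2 : ∀ row ∈ new, row.length = h.toNat)
    (hne : new ≠ arr) :
    ∃ i j : Int, inb w h i j ∧ getCell new i j ≠ getCell arr i j := by
  by_contra hall
  have hall' : ∀ i j : Int, inb w h i j → getCell new i j = getCell arr i j := by
    intro i j hij
    by_contra hne2
    exact hall ⟨i, j, hij, hne2⟩
  apply hne
  apply List.ext_getElem (by omega)
  intro n h1 h2
  apply List.ext_getElem
  · rw [hb2 _ (List.getElem_mem h1), ha2 _ (List.getElem_mem h2)]
  · intro k k1 k2
    have hkh : k < h.toNat := by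
      have := hb2 _ (List.getElem_mem h1); omega
    have hnw : n < w.toNat := by omega
    have hinb : inb w h (n : Int) (k : Int) := by
      refine ⟨by omega, ?_, by omega, ?_⟩ <;> omega
    have hg1 := getCell_elem new n k h1 k1
    have hg2 := getCell_elem arr n k h2 k2
    rw [← hg1, ← hg2]
    exact hall' (n : Int) (k : Int) hinb

theorem loopB_spec (m : List (List Int)) (w h si sj : Int) :
    ∀ (fuel r : ℕ) (arr : List (List Int)), MB m w h si sj r arr →
      w.toNat * h.toNat ≤ fuel + cntS m w h si sj r →
      ∀ i j : Int, inb w h i j →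
        getCell (loopB m w h fuel arr) i j = DV m w h si sj i j := by
  intro fuel
  induction fuel with
  | zero =>
    intro r arr hMB hbud i j hij
    -- every cell is already reached
    have hfull : ∀ a b : Int, inb w h a b → specLvl m w h si sj r a b = true := by
      intro a b hab
      obtain ⟨h0a, haw, h0b, hbh⟩ := hab
      have hsub : ((Finset.range w.toNat) ×ˢ (Finset.range h.toNat)).filter
          (fun p => specLvl m w h si sj r (p.1 : Int) (p.2 : Int) = true) =
          (Finset.range w.toNat) ×ˢ (Finset.range h.toNat) := by
        apply Finset.eq_of_subset_of_card_le (Finset.filter_subset _ _)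
        have := cntS_le m w h si sj r
        unfold cntS at hbud
        have hcard : ((Finset.range w.toNat) ×ˢ (Finset.range h.toNat)).card = w.toNat * h.toNat := by
          rw [Finset.card_product]; simp
        omega
      have hmem : (a.toNat, b.toNat) ∈ (Finset.range w.toNat) ×ˢ (Finset.range h.toNat) := by
        rw [Finset.mem_product]
        simp only [Finset.mem_range]
        omega
      rw [← hsub, Finset.mem_filter] at hmem
      have h2 := hmem.2
      simpa only [Int.toNat_of_nonneg h0a, Int.toNat_of_nonneg h0b] using h2
    show getCell arr i j = _
    rw [hMB.2.2 i j hij]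
    unfold TDV
    rw [if_pos (hfull i j hij)]
  | succ fuel ih =>
    intro r arr hMB hbud i j hij
    show getCell (let new := stepB m arr w h; if new = arr then arr else loopB m w h fuel new) i j = _
    by_cases hstab : stepB m arr w h = arr
    · rw [if_pos hstab]
      exact stable_spec m w h si sj r arr hMB hstab i j hij
    · rw [if_neg hstab]
      have hMB' := MB_step m w h si sj r arr hMB
      refine ih (r + 1) _ hMB' ?_ i j hij
      have hex : ∃ a b : Int, inb w h a b ∧ specLvl m w h si sj (r + 1) a b = true ∧
          specLvl m w h si sj r a b ≠ true := by
        obtain ⟨a, b, hab, hnej⟩ := grid_ne_exists w h arr (stepB m arr w h)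
          hMB.1 hMB.2.1 (by simp [stepB]) (by
            intro row hrow
            unfold stepB at hrow
            obtain ⟨x, _, rfl⟩ := List.mem_map.1 hrow
            simp) hstab
        rw [hMB'.2.2 a b hab, hMB.2.2 a b hab] at hnej
        refine ⟨a, b, hab, ?_, ?_⟩
        · by_contra hl1
          apply hnej
          unfold TDV
          rw [if_neg hl1, if_neg ?_]
          intro hl0
          exact hl1 (specLvl_mono m w h si sj (Nat.le_succ r) hl0)
        · intro hl0
          apply hnej
          unfold TDV
          rw [if_pos hl0, if_pos (specLvl_mono m w h si sj (Nat.le_succ r) hl0)]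
      have := cntS_strict m w h si sj r hex
      omega

theorem distsB_spec (m : List (List Int)) (w h si sj : Int) :
    ∀ i j : Int, inb w h i j →
      getCell (distsB m w h si sj) i j = DV m w h si sj i j := by
  have hMB0 : MB m w h si sj 0 (initB w h si sj) := by
    refine ⟨by simp [initB], ?_, ?_⟩
    · intro row hrow
      unfold initB at hrow
      obtain ⟨a, _, rfl⟩ := List.mem_map.1 hrow
      simp
    · intro i j hij
      rw [getCell_initB w h si sj hij]
      unfold TDV
      by_cases he : i = si ∧ j = sj
      · have hsl : specLvl m w h si sj 0 i j = true :=
          (specLvl_zero_iff m w h si sj i j).2 ⟨hij, he.1, he.2⟩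
        rw [if_pos he, if_pos hsl,
          DV_eq_iff m w h si sj i j 0 ⟨hsl, fun k _ => Nat.zero_le k⟩]
        simp
      · have hns : specLvl m w h si sj 0 i j ≠ true :=
          fun hlv => he ((specLvl_zero_iff m w h si sj i j).1 hlv).2
        rw [if_neg he, if_neg hns]
  intro i j hij
  unfold distsB
  exact loopB_spec m w h si sj (w.toNat * h.toNat) 0 (initB w h si sj) hMB0 (by omega) i j hij

-- ===== assembly =====

theorem flatMap_congr' {α β : Type} (l : List α) (f g : α → List β)
    (hfg : ∀ a ∈ l, f a = g a) : l.flatMap f = l.flatMap g := by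
  induction l with
  | nil => rfl
  | cons x t ih =>
    rw [List.flatMap_cons, List.flatMap_cons, hfg x (List.mem_cons_self ..),
      ih (fun a ha => hfg a (List.mem_cons_of_mem _ ha))]

theorem filterMap_congr' {α β : Type} (l : List α) (f g : α → Option β)
    (hfg : ∀ a ∈ l, f a = g a) : l.filterMap f = l.filterMap g := by
  induction l with
  | nil => rfl
  | cons x t ih =>
    rw [List.filterMap_cons, List.filterMap_cons, hfg x (List.mem_cons_self ..),
      ih (fun a ha => hfg a (List.mem_cons_of_mem _ ha))]

theorem scanMin_congr (w h : Int) (s f s' f' : List (List Int))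
    (hs : ∀ i j : Int, inb w h i j → getCell s i j = getCell s' i j)
    (hf : ∀ i j : Int, inb w h i j → getCell f i j = getCell f' i j) :
    scanMin s f w h = scanMin s' f' w h := by
  unfold scanMin
  have hcands : (List.range w.toNat).flatMap (fun (i : ℕ) =>
      (List.range h.toNat).filterMap (fun (j : ℕ) =>
        if getCell s (i : Int) (j : Int) ≠ 0 ∧ getCell f (i : Int) (j : Int) ≠ 0
        then some (getCell s (i : Int) (j : Int) + getCell f (i : Int) (j : Int)) else none)) =
      (List.range w.toNat).flatMap (fun (i : ℕ) =>
      (List.range h.toNat).filterMap (fun (j : ℕ) =>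
        if getCell s' (i : Int) (j : Int) ≠ 0 ∧ getCell f' (i : Int) (j : Int) ≠ 0
        then some (getCell s' (i : Int) (j : Int) + getCell f' (i : Int) (j : Int)) else none)) := by
    apply flatMap_congr'
    intro i hi
    rw [List.mem_range] at hi
    apply filterMap_congr'
    intro j hj
    rw [List.mem_range] at hj
    have hij : inb w h (i : Int) (j : Int) := by
      refine ⟨by omega, by omega, by omega, by omega⟩
    rw [hs (i : Int) (j : Int) hij, hf (i : Int) (j : Int) hij]
  rw [hcands]

-- ===== VERDICT (by name: the statement is the Claim_ definition above) =====
theorem solution_spec : Claim_equal_solution := by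
  intro map hdom hpre
  obtain ⟨hne, hh0, hrows, _⟩ := hpre
  unfold Spec_solution
  show scanMin
      (fillA map (map.length : Int) (((PySem.List.pyGet? map 0).getD []).length : Int) 0 0)
      (fillA map (map.length : Int) (((PySem.List.pyGet? map 0).getD []).length : Int)
        ((map.length : Int) - 1) ((((PySem.List.pyGet? map 0).getD []).length : Int) - 1))
      (map.length : Int) (((PySem.List.pyGet? map 0).getD []).length : Int) =
    scanMin
      (distsB map (map.length : Int) (((PySem.List.pyGet? map 0).getD []).length : Int) 0 0)
      (distsB map (map.length : Int) (((PySem.List.pyGet? map 0).getD []).length : Int)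
        ((map.length : Int) - 1) ((((PySem.List.pyGet? map 0).getD []).length : Int) - 1))
      (map.length : Int) (((PySem.List.pyGet? map 0).getD []).length : Int)
  have hw0 : 0 < (map.length : Int) := by
    have : map.length ≠ 0 := fun hz => hne (List.eq_nil_of_length_eq_zero hz)
    omega
  have hh0' : 0 < (((PySem.List.pyGet? map 0).getD []).length : Int) := by
    omega
  have hrows' : ∀ r ∈ map, (((PySem.List.pyGet? map 0).getD []).length : Int) ≤ (r.length : Int) := by
    intro r hr
    have := hrows r hr
    omega
  have hin00 : inb (map.length : Int) (((PySem.List.pyGet? map 0).getD []).length : Int) 0 0 :=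
    ⟨le_refl 0, hw0, le_refl 0, hh0'⟩
  have hinWH : inb (map.length : Int) (((PySem.List.pyGet? map 0).getD []).length : Int)
      ((map.length : Int) - 1) ((((PySem.List.pyGet? map 0).getD []).length : Int) - 1) :=
    ⟨by omega, by omega, by omega, by omega⟩
  apply scanMin_congr
  · intro i j hij
    rw [fillA_spec map _ _ 0 0 rfl hrows' hin00 i j hij,
      distsB_spec map _ _ 0 0 i j hij]
  · intro i j hij
    rw [fillA_spec map _ _ _ _ rfl hrows' hinWH i j hij,
      distsB_spec map _ _ _ _ i j hij]
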